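-- pv_equiv track=rewrite | github.com/alberto0723/DORM | catalog/tools.py | combine_tables
-- ===== SOURCE A (Python) =====
-- def drop_duplicates(dirty_list):
--     unique_elems = []
--     [unique_elems.append(elem) for elem in dirty_list if elem not in unique_elems]
--     return unique_elems
--
-- def combine_tables(patterns_list):
--     if len(patterns_list) == 0:
--         return [[]]
--     else:
--         current_pattern = patterns_list.pop(0)
--         combinations = []
--         for combination in combine_tables(patterns_list):
--             for current_table in current_pattern:
--                 temp = combination + [current_table]
--                 temp.sort()
--                 combinations.append(temp)
--         return drop_duplicates(combinations)
-- ===== SOURCE B (Python) =====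
-- def combine_tables(patterns_list):
--     # Iterative fold instead of recursion; dedup via a hash set of tuples kept in
--     # first-occurrence order. Like A, leaves patterns_list empty (pop()).
--     combinations = [[]]
--     while patterns_list:
--         pattern = patterns_list.pop()
--         seen = set()
--         next_combos = []
--         for combo in combinations:
--             for table in pattern:
--                 cand = sorted(combo + [table])
--                 key = tuple(cand)
--                 if key not in seen:
--                     seen.add(key)
--                     next_combos.append(cand)
--         combinations = next_combos
--     return combinations
-- ===== Notes on version B (the rewrite author's own statement) =====
-- stated objective: alternative
-- what changed: Replaces the recursion over the pattern list by an iterative fold that pops patterns from the end, and replaces the quadratic list-membership dedup pass with an inline hash-set of tuples kept in the same traversal order.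
import Mathlib
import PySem

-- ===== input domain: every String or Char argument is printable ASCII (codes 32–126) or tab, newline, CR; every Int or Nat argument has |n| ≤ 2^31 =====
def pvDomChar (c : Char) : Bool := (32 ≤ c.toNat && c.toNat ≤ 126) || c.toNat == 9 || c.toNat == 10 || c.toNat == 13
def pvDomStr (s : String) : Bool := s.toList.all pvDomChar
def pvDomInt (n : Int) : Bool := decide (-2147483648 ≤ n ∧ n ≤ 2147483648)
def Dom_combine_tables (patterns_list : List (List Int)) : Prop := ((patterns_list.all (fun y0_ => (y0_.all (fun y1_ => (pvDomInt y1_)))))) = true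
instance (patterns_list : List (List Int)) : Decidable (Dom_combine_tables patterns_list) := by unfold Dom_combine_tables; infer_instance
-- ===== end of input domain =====

-- B replaces A's recursion by an iterative fold (popping patterns from the end) and A's
-- list-membership dedup pass by an inline 'seen' set kept in the same traversal order.
-- A (and B) empty patterns_list in place via pop; the equivalence proved is about the return value.

-- ===== PORT A =====
def drop_duplicates (dirty_list : List (List Int)) : List (List Int) :=
  dirty_list.foldl (fun u e => if u.contains e then u else u ++ [e]) []

def combine_tables : List (List Int) → List (List Int)
  | [] => [[]]
  | current_pattern :: rest =>
      drop_duplicates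
        ((combine_tables rest).foldl
          (fun acc combination =>
            current_pattern.foldl
              (fun acc2 current_table =>
                acc2 ++ [PySem.List.sorted (combination ++ [current_table]) (fun x => x) false])
              acc)
          [])

-- ===== PORT B =====
-- one step of B's while-loop: extend every combination by every table of the pattern,
-- deduplicating on the fly with a 'seen' set
def bStep (combinations : List (List Int)) (pattern : List Int) : List (List Int) :=
  (combinations.foldl
    (fun (st : PySem.Set (List Int) × List (List Int)) combo =>
      pattern.foldl
        (fun st t =>
          let cand := PySem.List.sorted (combo ++ [t]) (fun x => x) false
          if PySem.Set.contains st.1 cand then st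
          else (PySem.Set.add st.1 cand, st.2 ++ [cand]))
        st)
    (PySem.Set.empty, [])).2

-- B's while-loop pops from the END of patterns_list: a fold over the reversed list
def combine_tables_alt (patterns_list : List (List Int)) : List (List Int) :=
  patterns_list.reverse.foldl bStep [[]]

-- ===== PRECONDITION & SPEC =====
def Spec_combine_tables (patterns_list : List (List Int)) (out : List (List Int)) : Prop := out = combine_tables_alt patterns_list
instance (patterns_list : List (List Int)) (out : List (List Int)) : Decidable (Spec_combine_tables patterns_list out) := by unfold Spec_combine_tables; infer_instance

-- ===== CLAIM (what is proved, stated in full; the proofs are below) =====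
def Claim_equal_combine_tables : Prop := ∀ (patterns_list : List (List Int)), Dom_combine_tables patterns_list → Spec_combine_tables patterns_list (combine_tables patterns_list)

-- ===== LEMMAS AND PROOFS =====

-- the flattened candidate stream both steps traverse, in order
def candStream (combinations : List (List Int)) (pattern : List Int) : List (List Int) :=
  combinations.flatMap (fun combo =>
    pattern.map (fun t => PySem.List.sorted (combo ++ [t]) (fun x => x) false))

-- A's nested append loop builds exactly candStream
lemma aBuild_eq (combinations : List (List Int)) (pattern : List Int) :
    combinations.foldl
      (fun acc combination =>
        pattern.foldl
          (fun acc2 current_table =>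
            acc2 ++ [PySem.List.sorted (combination ++ [current_table]) (fun x => x) false])
          acc)
      [] = candStream combinations pattern := by
  simp only [PySem.List.foldl_append_singleton_eq_map]
  rw [PySem.List.foldl_append_eq_flatMap]
  simp [candStream]

-- folding any step function over the nested loops = folding it over candStream
lemma nested_foldl_eq {σ : Type} (g : σ → List Int → σ)
    (combinations : List (List Int)) (pattern : List Int) (st : σ) :
    combinations.foldl
      (fun st combo =>
        pattern.foldl
          (fun st t => g st (PySem.List.sorted (combo ++ [t]) (fun x => x) false))
          st)
      st = (candStream combinations pattern).foldl g st := by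
  induction combinations generalizing st with
  | nil => simp [candStream]
  | cons c cs ih =>
      simp only [List.foldl_cons, candStream, List.flatMap_cons, List.foldl_append]
      rw [ih, List.foldl_map]
      rfl

-- the 'seen'-set fold returns the same list as A's list-membership dedup fold
lemma seen_fold_eq (L : List (List Int)) (S : PySem.Set (List Int)) (acc : List (List Int))
    (hinv : ∀ e, PySem.Set.contains S e = acc.contains e) :
    (L.foldl
      (fun (st : PySem.Set (List Int) × List (List Int)) e =>
        if PySem.Set.contains st.1 e then st else (PySem.Set.add st.1 e, st.2 ++ [e]))
      (S, acc)).2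
    = L.foldl (fun u e => if u.contains e then u else u ++ [e]) acc := by
  induction L generalizing S acc with
  | nil => rfl
  | cons e L ih =>
      simp only [List.foldl_cons, hinv e]
      by_cases h : acc.contains e = true
      · simp only [h]
        exact ih S acc hinv
      · simp only [h]
        have hSe : PySem.Set.contains S e = false := (hinv e).trans (by simpa using h)
        have hS' : e ∉ S := by simpa [PySem.Set.contains] using hSe
        refine ih _ _ (fun x => ?_)
        have hx := hinv x
        simp only [PySem.Set.contains, List.contains_eq_mem] at hx
        simp [PySem.Set.add, PySem.Set.contains, hS', hx, List.mem_append]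

-- one step of B equals one level of A
lemma bStep_eq (combinations : List (List Int)) (pattern : List Int) :
    bStep combinations pattern = drop_duplicates (candStream combinations pattern) := by
  unfold bStep drop_duplicates
  rw [nested_foldl_eq
      (fun (st : PySem.Set (List Int) × List (List Int)) cand =>
        if PySem.Set.contains st.1 cand then st else (PySem.Set.add st.1 cand, st.2 ++ [cand]))]
  exact seen_fold_eq _ PySem.Set.empty [] (fun e => by simp [PySem.Set.empty, PySem.Set.contains])

lemma combine_tables_eq_alt (patterns_list : List (List Int)) :
    combine_tables patterns_list = combine_tables_alt patterns_list := by
  induction patterns_list with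
  | nil => rfl
  | cons c cs ih =>
      unfold combine_tables combine_tables_alt
      rw [aBuild_eq, ← bStep_eq, List.reverse_cons, List.foldl_append]
      simp only [List.foldl_cons, List.foldl_nil]
      rw [ih]
      rfl

-- ===== VERDICT (by name: the statement is the Claim_ definition above) =====
theorem combine_tables_spec : Claim_equal_combine_tables := by
  intro pl _
  unfold Spec_combine_tables
  exact combine_tables_eq_alt pl
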